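-- pv_equiv track=rewrite | github.com/jute0311/B21 | selectways.py | selectSmartlybf
-- ===== SOURCE A (Python) =====
-- def selectPutPlaces(current_places,field):
--     '''
--     広げたスペースのところに置いていく
--     '''
--
--     selected_legalhands = []
--
--     for place in current_places:
--         i = place[0]
--         j = place[1]
--         if 0 < i < 19 and 0 < j < 19 :
--             if field[i-1][j] != 0 and field[i-1][j] != 10 and field[i-1][j] != 11 \
--                 and field[i][j-1] != 0 and field[i][j-1] != 10 and field[i][j-1] != 11\
--                 and field[i-1][j-1] == 1:
--                 selected_legalhands.append(place)
--             elif field[i][j-1] != 0 and field[i][j-1] != 10 and field[i][j-1] != 11 \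
--                 and field[i+1][j] != 0 and  field[i+1][j] != 10 and field[i+1][j] != 11 \
--                 and field[i+1][j-1] == 1:
--                 selected_legalhands.append(place)
--             elif field[i+1][j] != 0 and  field[i+1][j] != 10 and field[i+1][j] != 11 \
--                 and field[i][j+1] != 0 and field[i][j+1] != 10 and field[i][j+1] != 11 \
--                 and field[i+1][j+1] == 1:
--                 selected_legalhands.append(place)
--             elif field[i][j+1] != 0 and field[i][j+1] != 10 and field[i][j+1] != 11 \
--                 and field[i-1][j] != 0 and field[i-1][j] != 10 and field[i-1][j] != 11 \
--                 and field[i-1][j+1] == 1: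
--                 selected_legalhands.append(place)
--
--     if selected_legalhands != [] :
--         return selected_legalhands
--     else :
--         return current_places
--
-- def selectSmartlybf(current_legalhands,field,current_places,count):
--     '''
--     広げたスペースのところに置いていく
--     '''
--     selected_places = selectPutPlaces(current_places,field)
--     selected_legalhands = {}
--     judge_w = 0
--
--     for key,value in current_legalhands.items():
--         judge_p = 0
--         i = value[3]
--         j = value[4]
--         if 0 < i < 19 and 0 < j < 19 :
--             if field[i-1][j] != 0 and field[i-1][j] != 10 and field[i-1][j] != 11 \
--                 and field[i][j-1] != 0 and field[i][j-1] != 10 and field[i][j-1] != 11\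
--                 and field[i-1][j-1] == 1:
--                 new = {key:value}
--                 selected_legalhands.update(new)
--                 judge_p = 1
--             elif field[i][j-1] != 0 and field[i][j-1] != 10 and field[i][j-1] != 11 \
--                 and field[i+1][j] != 0 and  field[i+1][j] != 10 and field[i+1][j] != 11 \
--                 and field[i+1][j-1] == 1:
--                 new = {key:value}
--                 selected_legalhands.update(new)
--                 judge_p = 1
--             elif field[i+1][j] != 0 and  field[i+1][j] != 10 and field[i+1][j] != 11 \
--                 and field[i][j+1] != 0 and field[i][j+1] != 10 and field[i][j+1] != 11 \
--                 and field[i+1][j+1] == 1: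
--                 new = {key:value}
--                 selected_legalhands.update(new)
--                 judge_p = 1
--             elif field[i][j+1] != 0 and field[i][j+1] != 10 and field[i][j+1] != 11 \
--                 and field[i-1][j] != 0 and field[i-1][j] != 10 and field[i-1][j] != 11 \
--                 and field[i-1][j+1] == 1:
--                 new = {key:value}
--                 selected_legalhands.update(new)
--                 judge_p = 1
--         if judge_p == 1:
--             judge_w += 1
--
--
--     if selected_legalhands != {} :
--         if count < 6 and len(selected_places) >= 2:
--             return selected_legalhands
--         elif 6 <= count and len(selected_places) >= 1:
--             return selected_legalhands
--         else :
--             return current_legalhands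
--
--     else :
--         return current_legalhands
-- ===== SOURCE B (Python) =====
-- def selectSmartlybf(current_legalhands, field, current_places, count):
--     marked = set(_expandable_cells(field))
--     places = [p for p in current_places if (p[0], p[1]) in marked] or current_places
--     hands = {k: v for k, v in current_legalhands.items() if (v[3], v[4]) in marked}
--     if hands and len(places) >= (2 if count < 6 else 1):
--         return hands
--     return current_legalhands
--
--
-- def _free(c):
--     return c not in (0, 10, 11)
--
--
-- def _expandable_cells(field):
--     # Inverted scan of the board: each stone (value 1) at (a, b) certifies its
--     # four diagonal neighbours (i, j) = (a - di, b - dj) as expandable, provided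
--     # the two orthogonal cells field[a][j] and field[i][b] exist and are free.
--     for a, row in enumerate(field):
--         for b, c in enumerate(row):
--             if c == 1:
--                 for di, dj in ((-1, -1), (1, -1), (1, 1), (-1, 1)):
--                     i, j = a - di, b - dj
--                     if 0 < i < 19 and 0 < j < 19 and i < len(field) \
--                             and j < len(row) and _free(row[j]) \
--                             and b < len(field[i]) and _free(field[i][b]):
--                         yield (i, j)
-- ===== Notes on version B (the rewrite author's own statement) =====
-- stated objective: alternative
-- what changed: Inverts the data flow: instead of re-running the four-branch neighbour test per place and per hand, B makes one pass over the board that marks, for every stone cell (value 1), the diagonal neighbours it certifies into a set, and then selects places and hands by a plain set-membership lookup; the dead judge_w counter is dropped and the two return thresholds are merged into one condition.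
-- outside the precondition, e.g. on selectSmartlybf({}, [[1, 1], [1, 1]], [[1, 1]], 0): A returns {}, B returns {}
import Mathlib
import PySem

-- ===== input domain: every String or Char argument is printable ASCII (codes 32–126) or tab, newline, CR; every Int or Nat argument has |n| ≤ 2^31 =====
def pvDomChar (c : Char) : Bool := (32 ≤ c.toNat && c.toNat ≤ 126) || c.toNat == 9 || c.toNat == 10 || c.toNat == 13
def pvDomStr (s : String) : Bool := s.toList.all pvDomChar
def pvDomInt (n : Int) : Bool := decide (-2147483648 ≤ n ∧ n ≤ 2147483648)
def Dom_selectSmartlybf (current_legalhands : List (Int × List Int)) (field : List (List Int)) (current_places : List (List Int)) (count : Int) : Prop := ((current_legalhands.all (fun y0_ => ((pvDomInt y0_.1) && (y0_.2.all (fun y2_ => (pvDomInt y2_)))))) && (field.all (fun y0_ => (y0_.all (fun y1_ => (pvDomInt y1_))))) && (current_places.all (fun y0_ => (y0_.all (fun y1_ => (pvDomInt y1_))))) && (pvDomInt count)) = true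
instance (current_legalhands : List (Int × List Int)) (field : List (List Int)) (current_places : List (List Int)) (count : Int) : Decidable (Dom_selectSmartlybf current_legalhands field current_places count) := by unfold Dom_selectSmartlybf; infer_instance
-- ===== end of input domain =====

-- B inverts the scan: one pass over the board marks, for every stone cell (=1), its
-- certified diagonal neighbours into a set, and places/hands are then selected by a
-- set lookup instead of re-checking the four elif branches per item; objective: alternative.


-- shared indexing stand-ins for Python's xs[k] / field[i][j]; the .getD defaults are
-- never reached on inputs satisfying Pre_ (which keeps every used index in range)
def pvAt (xs : List Int) (k : Int) : Int := (PySem.List.pyGet? xs k).getD 0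
def pvCell (field : List (List Int)) (i j : Int) : Int :=
  (PySem.List.pyGet? ((PySem.List.pyGet? field i).getD []) j).getD 0

-- ===== PORT A =====
-- the boundary check + four-branch elif chain that appears verbatim in both
-- selectPutPlaces and selectSmartlybf (true = this place/hand is appended/kept)
def pvJudgeA (field : List (List Int)) (i j : Int) : Bool :=
  if 0 < i ∧ i < 19 ∧ 0 < j ∧ j < 19 then
    if pvCell field (i-1) j ≠ 0 ∧ pvCell field (i-1) j ≠ 10 ∧ pvCell field (i-1) j ≠ 11 ∧
       pvCell field i (j-1) ≠ 0 ∧ pvCell field i (j-1) ≠ 10 ∧ pvCell field i (j-1) ≠ 11 ∧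
       pvCell field (i-1) (j-1) = 1 then true
    else if pvCell field i (j-1) ≠ 0 ∧ pvCell field i (j-1) ≠ 10 ∧ pvCell field i (j-1) ≠ 11 ∧
       pvCell field (i+1) j ≠ 0 ∧ pvCell field (i+1) j ≠ 10 ∧ pvCell field (i+1) j ≠ 11 ∧
       pvCell field (i+1) (j-1) = 1 then true
    else if pvCell field (i+1) j ≠ 0 ∧ pvCell field (i+1) j ≠ 10 ∧ pvCell field (i+1) j ≠ 11 ∧
       pvCell field i (j+1) ≠ 0 ∧ pvCell field i (j+1) ≠ 10 ∧ pvCell field i (j+1) ≠ 11 ∧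
       pvCell field (i+1) (j+1) = 1 then true
    else if pvCell field i (j+1) ≠ 0 ∧ pvCell field i (j+1) ≠ 10 ∧ pvCell field i (j+1) ≠ 11 ∧
       pvCell field (i-1) j ≠ 0 ∧ pvCell field (i-1) j ≠ 10 ∧ pvCell field (i-1) j ≠ 11 ∧
       pvCell field (i-1) (j+1) = 1 then true
    else false
  else false

def pvSelectPutPlaces (current_places : List (List Int)) (field : List (List Int)) : List (List Int) :=
  let selected_legalhands := current_places.foldl (fun acc place =>
    if pvJudgeA field (pvAt place 0) (pvAt place 1) then acc ++ [place] else acc) []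
  if selected_legalhands ≠ [] then selected_legalhands else current_places

def selectSmartlybf (current_legalhands : List (Int × List Int)) (field : List (List Int)) (current_places : List (List Int)) (count : Int) : List (Int × List Int) :=
  let selected_places := pvSelectPutPlaces current_places field
  -- loop accumulating (selected_legalhands, judge_w); the dict update and judge_p = 1
  -- happen in each of the four branches, i.e. exactly when pvJudgeA holds
  let st := current_legalhands.foldl
    (fun (st : PySem.Dict Int (List Int) × Int) kv =>
      (if pvJudgeA field (pvAt kv.2 3) (pvAt kv.2 4) then st.1.insert kv.1 kv.2 else st.1,
       if pvJudgeA field (pvAt kv.2 3) (pvAt kv.2 4) then st.2 + 1 else st.2))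
    (PySem.Dict.empty, 0)
  let selected_legalhands := st.1
  if selected_legalhands ≠ PySem.Dict.empty then
    if count < 6 ∧ 2 ≤ selected_places.length then selected_legalhands.items
    else if 6 ≤ count ∧ 1 ≤ selected_places.length then selected_legalhands.items
    else current_legalhands
  else current_legalhands

-- ===== PORT B =====
def pvFree (c : Int) : Bool := decide (c ≠ 0 ∧ c ≠ 10 ∧ c ≠ 11)

def pvCorners : List (Int × Int) := [(-1,-1), (1,-1), (1,1), (-1,1)]

-- _expandable_cells: every stone (value 1) at (a, b) emits its four diagonal
-- neighbours (i, j) = (a - di, b - dj) whose two orthogonal cells exist and are free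
def pvExpandableCells (field : List (List Int)) : List (Int × Int) :=
  (PySem.List.enumerate field).flatMap (fun ar =>
    (PySem.List.enumerate ar.2).flatMap (fun bc =>
      if bc.2 = 1 then
        pvCorners.filterMap (fun d =>
          if 0 < ar.1 - d.1 ∧ ar.1 - d.1 < 19 ∧ 0 < bc.1 - d.2 ∧ bc.1 - d.2 < 19 ∧
             ar.1 - d.1 < (field.length : Int) ∧
             bc.1 - d.2 < (ar.2.length : Int) ∧ pvFree (pvAt ar.2 (bc.1 - d.2)) = true ∧
             bc.1 < (((PySem.List.pyGet? field (ar.1 - d.1)).getD []).length : Int) ∧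
             pvFree (pvCell field (ar.1 - d.1) bc.1) = true
          then some (ar.1 - d.1, bc.1 - d.2) else none)
      else []))

def selectSmartlybf_alt (current_legalhands : List (Int × List Int)) (field : List (List Int)) (current_places : List (List Int)) (count : Int) : List (Int × List Int) :=
  let marked := PySem.Set.ofList (pvExpandableCells field)
  let filtered := current_places.filter (fun p => PySem.Set.contains marked (pvAt p 0, pvAt p 1))
  let places := if filtered = [] then current_places else filtered
  let hands := current_legalhands.filter (fun kv => PySem.Set.contains marked (pvAt kv.2 3, pvAt kv.2 4))
  if hands ≠ [] ∧ (if count < 6 then 2 else 1) ≤ places.length then hands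
  else current_legalhands

-- ===== PRECONDITION & SPEC =====
-- all nine neighbour cells of (i, j) are in range: rows i-1, i, i+1 exist and reach column j+1
def pvInRange (field : List (List Int)) (i j : Int) : Prop :=
  i + 1 < (field.length : Int) ∧
  ∀ di ∈ ([-1, 0, 1] : List Int),
    j + 1 < (((PySem.List.pyGet? field (i + di)).getD []).length : Int)

-- Pre_ excludes (a) inputs whose dict argument would need duplicate keys (impossible for a
-- real Python dict) and (b) ragged/short fields, places shorter than 2 or values shorter
-- than 5, where Python indexing raises; requiring ALL nine neighbours in range is slightly
-- stronger than A's short-circuit evaluation needs, so a few ragged-field inputs on which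
-- A still returns are excluded (see the cite in claim.json).
def Pre_selectSmartlybf (current_legalhands : List (Int × List Int)) (field : List (List Int)) (current_places : List (List Int)) (count : Int) : Prop :=
  (current_legalhands.map Prod.fst).Nodup ∧
  (∀ p ∈ current_places, 2 ≤ p.length ∧
    (0 < pvAt p 0 ∧ pvAt p 0 < 19 ∧ 0 < pvAt p 1 ∧ pvAt p 1 < 19 →
      pvInRange field (pvAt p 0) (pvAt p 1))) ∧
  (∀ kv ∈ current_legalhands, 5 ≤ kv.2.length ∧
    (0 < pvAt kv.2 3 ∧ pvAt kv.2 3 < 19 ∧ 0 < pvAt kv.2 4 ∧ pvAt kv.2 4 < 19 →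
      pvInRange field (pvAt kv.2 3) (pvAt kv.2 4)))

instance (current_legalhands : List (Int × List Int)) (field : List (List Int)) (current_places : List (List Int)) (count : Int) : Decidable (Pre_selectSmartlybf current_legalhands field current_places count) := by
  unfold Pre_selectSmartlybf pvInRange; infer_instance

def pvWitness_selectSmartlybf : (List (Int × List Int)) × List (List Int) × List (List Int) × Int :=
  ([(7, [0, 0, 0, 1, 1])],
   [[1,1,1],[1,1,1],[1,1,1]],
   [[1, 1], [0, 5]],
   3)

def Spec_selectSmartlybf (current_legalhands : List (Int × List Int)) (field : List (List Int)) (current_places : List (List Int)) (count : Int) (out : List (Int × List Int)) : Prop := out = selectSmartlybf_alt current_legalhands field current_places count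
instance (current_legalhands : List (Int × List Int)) (field : List (List Int)) (current_places : List (List Int)) (count : Int) (out : List (Int × List Int)) : Decidable (Spec_selectSmartlybf current_legalhands field current_places count out) := by unfold Spec_selectSmartlybf; infer_instance

-- ===== CLAIM (what is proved, stated in full; the proofs are below) =====
def Claim_equal_selectSmartlybf : Prop := ∀ (current_legalhands : List (Int × List Int)) (field : List (List Int)) (current_places : List (List Int)) (count : Int), Dom_selectSmartlybf current_legalhands field current_places count → Pre_selectSmartlybf current_legalhands field current_places count → Spec_selectSmartlybf current_legalhands field current_places count (selectSmartlybf current_legalhands field current_places count)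

-- ===== LEMMAS AND PROOFS =====

-- proof-side corner predicate: the boundary check + "some corner certifies (i, j)"
def pvExpandable (field : List (List Int)) (i j : Int) : Bool :=
  decide (0 < i ∧ i < 19 ∧ 0 < j ∧ j < 19) &&
  pvCorners.any (fun d =>
    pvFree (pvCell field (i + d.1) j) && pvFree (pvCell field i (j + d.2)) &&
    decide (pvCell field (i + d.1) (j + d.2) = 1))

-- the elif chain and the corner-table any() accept exactly the same (i, j)
theorem pvJudge_eq_expandable (field : List (List Int)) (i j : Int) :
    pvJudgeA field i j = pvExpandable field i j := by
  simp only [pvJudgeA, pvExpandable, pvFree, pvCorners, List.any_cons, List.any_nil,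
    Bool.or_false]
  rw [show i + (-1 : Int) = i - 1 from by ring, show j + (-1 : Int) = j - 1 from by ring]
  generalize pvCell field (i-1) j = x1
  generalize pvCell field i (j-1) = x2
  generalize pvCell field (i-1) (j-1) = x3
  generalize pvCell field (i+1) j = x4
  generalize pvCell field (i+1) (j-1) = x5
  generalize pvCell field i (j+1) = x6
  generalize pvCell field (i+1) (j+1) = x7
  generalize pvCell field (i-1) (j+1) = x8
  by_cases hB : 0 < i ∧ i < 19 ∧ 0 < j ∧ j < 19
  · simp only [hB]
    split_ifs <;> simp_all
  · simp [hB]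

-- valid nonnegative indexing: pyGet? returns the element
theorem pyGet?_valid {α : Type} (xs : List α) (k : Int) (h0 : 0 ≤ k)
    (h1 : k < (xs.length : Int)) :
    PySem.List.pyGet? xs k = some (xs[k.toNat]'(by omega)) := by
  have h2 := PySem.List.pyGet?_natCast (xs := xs) (n := k.toNat)
  rw [Int.toNat_of_nonneg h0] at h2
  rw [h2]
  exact List.getElem?_eq_getElem (by omega)

-- membership in the inverted scan's output = the corner predicate, whenever the
-- nine neighbours of an in-bounds (i, j) are in range
theorem mem_cells_iff (field : List (List Int)) (i j : Int)
    (h : 0 < i ∧ i < 19 ∧ 0 < j ∧ j < 19 → pvInRange field i j) :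
    ((i, j) ∈ pvExpandableCells field) ↔ pvExpandable field i j = true := by
  constructor
  · rintro hm
    simp only [pvExpandableCells, List.mem_flatMap] at hm
    obtain ⟨ar, har, bc, hbc, hmem⟩ := hm
    by_cases h1 : bc.2 = 1
    swap
    · simp [h1] at hmem
    rw [if_pos h1] at hmem
    rw [List.mem_filterMap] at hmem
    obtain ⟨d, hd, hsome⟩ := hmem
    rw [Option.ite_none_right_eq_some] at hsome
    obtain ⟨hg, hpair⟩ := hsome
    have hpq := Option.some.inj hpair
    rw [Prod.mk.injEq] at hpq
    obtain ⟨hij1, hij2⟩ := hpq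
    obtain ⟨k1, hk1, hark⟩ := (PySem.List.mem_enumerate_iff _ _ _).mp har
    obtain ⟨k2, hk2, hbck⟩ := (PySem.List.mem_enumerate_iff _ _ _).mp hbc
    have hA1 : ar.1 = (k1 : Int) := by rw [hark]; simp
    have hA2 : ar.2 = field[k1] := by rw [hark]
    have hB1 : bc.1 = (k2 : Int) := by rw [hbck]; simp
    have hB2 : bc.2 = ar.2[k2] := by rw [hbck]
    have e1 : ar.1 = i + d.1 := by omega
    have e2 : bc.1 = j + d.2 := by omega
    rw [e1, e2] at hg
    simp only [add_sub_cancel_right] at hg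
    obtain ⟨hg1, hg2, hg3, hg4, hg5, hg6, hg7, hg8, hg9⟩ := hg
    have hrow : PySem.List.pyGet? field (i + d.1) = some ar.2 := by
      rw [← e1, hA1, hA2]
      exact pyGet?_valid field _ (by omega) (by exact_mod_cast hk1)
    have hk2' : j + d.2 < (ar.2.length : Int) := by
      rw [← e2, hB1]; exact_mod_cast hk2
    have hcellab : pvCell field (i + d.1) (j + d.2) = 1 := by
      unfold pvCell
      rw [hrow, Option.getD_some,
        pyGet?_valid ar.2 (j + d.2) (by omega) hk2']
      rw [Option.getD_some]
      have : ar.2[(j + d.2).toNat]'(by omega) = ar.2[k2] := by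
        congr 1; omega
      rw [this, ← hB2, h1]
    have hcellaj : pvCell field (i + d.1) j = pvAt ar.2 j := by
      unfold pvCell pvAt
      rw [hrow, Option.getD_some]
    simp only [pvExpandable, Bool.and_eq_true, List.any_eq_true]
    refine ⟨by simp only [decide_eq_true_eq]; omega, d, hd, ?_⟩
    rw [hcellaj, hcellab]
    simp [hg7, hg9]
  · intro he
    simp only [pvExpandable, Bool.and_eq_true, List.any_eq_true, decide_eq_true_eq] at he
    obtain ⟨hB, d, hd, ⟨hc1, hc2⟩, hc3⟩ := he
    obtain ⟨hlen, hrows⟩ := h hB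
    have hd' : d ∈ pvCorners := hd
    simp only [pvCorners, List.mem_cons, List.not_mem_nil, or_false] at hd'
    have hd1 : d.1 = -1 ∨ d.1 = 1 := by rcases hd' with h'|h'|h'|h' <;> rw [h'] <;> simp
    have hd2 : d.2 = -1 ∨ d.2 = 1 := by rcases hd' with h'|h'|h'|h' <;> rw [h'] <;> simp
    have ha0 : (0:Int) ≤ i + d.1 := by rcases hd1 with h'|h' <;> omega
    have ha1 : i + d.1 < (field.length : Int) := by rcases hd1 with h'|h' <;> omega
    have hrowa := hrows d.1 (by rcases hd1 with h'|h' <;> simp [h'])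
    have hrowi := hrows 0 (by simp)
    rw [add_zero] at hrowi
    have hrow : PySem.List.pyGet? field (i + d.1) = some (field[(i+d.1).toNat]'(by omega)) :=
      pyGet?_valid field _ ha0 ha1
    set row := field[(i+d.1).toNat]'(by omega) with hrowdef
    have hrlen : j + 1 < (row.length : Int) := by
      rw [hrow, Option.getD_some] at hrowa; exact hrowa
    have hb0 : (0:Int) ≤ j + d.2 := by rcases hd2 with h'|h' <;> omega
    have hb1 : j + d.2 < (row.length : Int) := by rcases hd2 with h'|h' <;> omega
    have helem : row[(j+d.2).toNat]'(by omega) = pvCell field (i+d.1) (j+d.2) := by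
      unfold pvCell
      rw [hrow, Option.getD_some, pyGet?_valid row (j + d.2) hb0 hb1, Option.getD_some]
    have hAtj : pvAt row j = pvCell field (i + d.1) j := by
      unfold pvCell pvAt
      rw [hrow, Option.getD_some]
    simp only [pvExpandableCells, List.mem_flatMap, PySem.List.mem_enumerate_iff]
    refine ⟨((i + d.1 : Int), row), ⟨(i+d.1).toNat, by omega, ?_⟩,
      ((j + d.2 : Int), row[(j+d.2).toNat]'(by omega)), ⟨(j+d.2).toNat, by show (j+d.2).toNat < row.length; omega, ?_⟩, ?_⟩
    · congr 1; omega
    · congr 1; omega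
    · have h1 : row[(j+d.2).toNat]'(by omega) = 1 := by rw [helem]; exact hc3
      simp only [h1, if_true, List.mem_filterMap]
      refine ⟨d, hd, ?_⟩
      simp only [add_sub_cancel_right]
      split_ifs with hcnd
      · rfl
      · exfalso
        apply hcnd
        refine ⟨hB.1, hB.2.1, hB.2.2.1, hB.2.2.2, by omega, by omega, ?_, ?_, hc2⟩
        · rw [hAtj]; exact hc1
        · rcases hd2 with h'|h' <;> omega

-- the set lookup computes the corner predicate
theorem contains_cells (field : List (List Int)) (i j : Int)
    (h : 0 < i ∧ i < 19 ∧ 0 < j ∧ j < 19 → pvInRange field i j) :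
    PySem.Set.contains (PySem.Set.ofList (pvExpandableCells field)) (i, j) =
      pvJudgeA field i j := by
  rw [pvJudge_eq_expandable]
  by_cases hm : (i, j) ∈ pvExpandableCells field
  · rw [((mem_cells_iff field i j h).mp hm)]
    exact (PySem.Set.contains_iff _ _).mpr ((PySem.Set.mem_ofList _ _).mpr hm)
  · have h2 : pvExpandable field i j = false := by
      cases he : pvExpandable field i j
      · rfl
      · exact absurd ((mem_cells_iff field i j h).mpr he) hm
    rw [h2]
    cases hc : PySem.Set.contains (PySem.Set.ofList (pvExpandableCells field)) (i, j)
    · rfl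
    · exact absurd ((PySem.Set.mem_ofList _ _).mp ((PySem.Set.contains_iff _ _).mp hc)) hm

theorem pvPutPlaces_eq (current_places field : List (List Int))
    (h : ∀ p ∈ current_places, 0 < pvAt p 0 ∧ pvAt p 0 < 19 ∧ 0 < pvAt p 1 ∧ pvAt p 1 < 19 →
      pvInRange field (pvAt p 0) (pvAt p 1)) :
    pvSelectPutPlaces current_places field =
      (let f := current_places.filter (fun p =>
        PySem.Set.contains (PySem.Set.ofList (pvExpandableCells field)) (pvAt p 0, pvAt p 1));
       if f = [] then current_places else f) := by
  simp only [pvSelectPutPlaces, PySem.List.foldl_append_if_eq_filter, List.nil_append]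
  have heq : current_places.filter (fun p => pvJudgeA field (pvAt p 0) (pvAt p 1)) =
      current_places.filter (fun p =>
        PySem.Set.contains (PySem.Set.ofList (pvExpandableCells field)) (pvAt p 0, pvAt p 1)) :=
    List.filter_congr (fun p hp => (contains_cells field (pvAt p 0) (pvAt p 1) (h p hp)).symm)
  rw [heq]
  split_ifs <;> simp_all

-- the selecting loop of A: under unique keys the built dict's items are the filtered list
theorem pvFold_items (l : List (Int × List Int)) (p : Int × List Int → Bool)
    (d : PySem.Dict Int (List Int)) (w : Int)
    (hd : (d.items.map Prod.fst ++ l.map Prod.fst).Nodup) :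
    (l.foldl (fun (st : PySem.Dict Int (List Int) × Int) kv =>
        (if p kv then st.1.insert kv.1 kv.2 else st.1,
         if p kv then st.2 + 1 else st.2)) (d, w)).1.items
      = d.items ++ l.filter p := by
  induction l generalizing d w with
  | nil => simp
  | cons kv t ih =>
    rw [List.map_cons] at hd
    simp only [List.foldl_cons]
    by_cases hp : p kv
    · have hk : kv.1 ∉ d.items.map Prod.fst := fun h =>
        (List.disjoint_of_nodup_append hd) h (List.mem_cons_self ..)
      have hc : d.contains kv.1 = false := by
        cases h : d.contains kv.1
        · rfl
        · exact absurd (by simpa [PySem.Dict.keys] using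
            (PySem.Dict.contains_iff_mem_keys (d := d) (k := kv.1)).mp h) hk
      have hit := PySem.Dict.items_insert_of_not_contains (d := d) (k := kv.1) (v := kv.2) hc
      simp only [hp, if_true]
      rw [ih (d.insert kv.1 kv.2) (w + 1)
        (by rw [hit]; simpa [List.append_assoc] using hd)]
      rw [hit]
      simp [hp]
    · simp only [hp, Bool.false_eq_true, if_false]
      rw [ih d w (hd.sublist
        (List.Sublist.append_left (List.sublist_cons_self kv.1 (t.map Prod.fst)) _))]
      simp [hp]

-- ===== VERDICT (by name: the statement is the Claim_ definition above) =====
theorem selectSmartlybf_spec : Claim_equal_selectSmartlybf := by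
  intro cl field cp count _hdom hpre
  unfold Spec_selectSmartlybf
  simp only [selectSmartlybf, selectSmartlybf_alt]
  rw [pvPutPlaces_eq cp field (fun p hp => (hpre.2.1 p hp).2)]
  have hitems : (cl.foldl (fun (st : PySem.Dict Int (List Int) × Int) kv =>
        (if pvJudgeA field (pvAt kv.2 3) (pvAt kv.2 4) then st.1.insert kv.1 kv.2 else st.1,
         if pvJudgeA field (pvAt kv.2 3) (pvAt kv.2 4) then st.2 + 1 else st.2))
        (PySem.Dict.empty, 0)).1.items
      = cl.filter (fun kv =>
          PySem.Set.contains (PySem.Set.ofList (pvExpandableCells field)) (pvAt kv.2 3, pvAt kv.2 4)) := by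
    rw [pvFold_items cl (fun kv => pvJudgeA field (pvAt kv.2 3) (pvAt kv.2 4))
      PySem.Dict.empty 0 (by simpa [PySem.Dict.empty, PySem.Dict.items] using hpre.1)]
    simpa using
      List.filter_congr (fun kv hkv =>
        (contains_cells field (pvAt kv.2 3) (pvAt kv.2 4) ((hpre.2.2 kv hkv).2)).symm)
  set st1 := (cl.foldl (fun (st : PySem.Dict Int (List Int) × Int) kv =>
        (if pvJudgeA field (pvAt kv.2 3) (pvAt kv.2 4) then st.1.insert kv.1 kv.2 else st.1,
         if pvJudgeA field (pvAt kv.2 3) (pvAt kv.2 4) then st.2 + 1 else st.2))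
        (PySem.Dict.empty, 0)).1 with hst
  set E := cl.filter (fun kv =>
      PySem.Set.contains (PySem.Set.ofList (pvExpandableCells field)) (pvAt kv.2 3, pvAt kv.2 4)) with hE
  set n := (if cp.filter (fun p =>
      PySem.Set.contains (PySem.Set.ofList (pvExpandableCells field)) (pvAt p 0, pvAt p 1)) = []
      then cp else cp.filter (fun p =>
      PySem.Set.contains (PySem.Set.ofList (pvExpandableCells field)) (pvAt p 0, pvAt p 1))).length with hn
  by_cases hEnil : E = []
  · have h0 : st1 = PySem.Dict.empty := by
      apply PySem.Dict.ext
      rw [hitems, hEnil]; rfl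
    simp [h0, hEnil]
  · have h0 : st1 ≠ PySem.Dict.empty := fun h => hEnil (by rw [← hitems, h]; rfl)
    rw [if_pos h0, hitems]
    split_ifs <;> first | rfl | omega | (exact absurd hEnil (by tauto))
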